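-- pv_equiv track=rewrite | github.com/hope409/TodaysAlgorithm | Practice/My_Grid2/Baby_gin/baby_gin.py | find_run
-- ===== SOURCE A (Python) =====
-- def find_run(arr):
--     for i in range(8):
--         if arr[i] >= 1 and arr[i + 1] >= 1 and arr[i + 2] >= 1:
--             arr[i] -= 1
--             arr[i + 1] -= 1
--             arr[i + 2] -= 1
--             return True
--     return False
-- ===== SOURCE B (Python) =====
-- def find_run(arr):
--     count = 0
--     for j in range(10):
--         if count + (10 - j) < 3:
--             return False  # too few cells left for a run of three to complete
--         if arr[j] >= 1:
--             count += 1
--             if count == 3: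
--                 arr[j - 2] -= 1
--                 arr[j - 1] -= 1
--                 arr[j] -= 1
--                 return True
--         else:
--             count = 0
--     return False
-- ===== Notes on version B (the rewrite author's own statement) =====
-- stated objective: alternative
-- what changed: Replaces A's sliding-window scan that re-reads each cell up to three times (arr[i], arr[i+1], arr[i+2] for i in range(8)) with a single pass keeping a running count of consecutive positive cells, returning True when the count reaches 3 and False early once too few cells remain for a run to complete.
import Mathlib
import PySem

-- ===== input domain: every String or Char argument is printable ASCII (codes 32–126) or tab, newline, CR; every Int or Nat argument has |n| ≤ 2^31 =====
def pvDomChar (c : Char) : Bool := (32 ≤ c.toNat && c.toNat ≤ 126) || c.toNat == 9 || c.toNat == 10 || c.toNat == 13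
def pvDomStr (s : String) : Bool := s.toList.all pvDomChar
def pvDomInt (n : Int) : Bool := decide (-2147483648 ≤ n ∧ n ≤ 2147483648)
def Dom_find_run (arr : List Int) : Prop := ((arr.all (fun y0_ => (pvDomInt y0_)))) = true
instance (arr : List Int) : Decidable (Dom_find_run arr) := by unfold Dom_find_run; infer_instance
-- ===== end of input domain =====

-- B replaces A's re-reading 3-cell window scan by a single pass that keeps a running count of
-- consecutive positive cells (objective: alternative decomposition, one read per index).
-- Both Pythons mutate arr in place (they decrement the same three cells); the equivalence
-- proved here is about the RETURN value only.

-- ===== PORT A =====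
-- Out-of-range arr[i] raises IndexError in Python; those inputs are excluded by Pre_find_run,
-- so the default 0 of pyGetD is never reached on admitted inputs.
def findRunA (arr : List Int) (i : Nat) : Bool :=
  if i < 8 then
    if PySem.List.pyGetD arr (i : Int) 0 ≥ 1 ∧ PySem.List.pyGetD arr ((i : Int) + 1) 0 ≥ 1
        ∧ PySem.List.pyGetD arr ((i : Int) + 2) 0 ≥ 1 then
      true
    else
      findRunA arr (i + 1)
  else
    false
termination_by 8 - i

def find_run (arr : List Int) : Bool := findRunA arr 0

-- ===== PORT B =====
def findRunB (arr : List Int) (j : Nat) (count : Int) : Bool :=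
  if j < 10 then
    if count + (10 - (j : Int)) < 3 then
      false
    else if PySem.List.pyGetD arr (j : Int) 0 ≥ 1 then
      (if count + 1 = 3 then true else findRunB arr (j + 1) (count + 1))
    else
      findRunB arr (j + 1) 0
  else
    false
termination_by 10 - j

def find_run_alt (arr : List Int) : Bool := findRunB arr 0 0

-- ===== PRECONDITION & SPEC =====
-- Pre_ excludes exactly the inputs on which the Python A raises IndexError: lists shorter
-- than 10 whose scan reaches an out-of-range index before any all-positive window returns True.
def Pre_find_run (arr : List Int) : Prop :=
  10 ≤ arr.length
  ∨ (∃ i : Nat, i < 8 ∧ i + 3 ≤ arr.length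
      ∧ 1 ≤ PySem.List.pyGetD arr (i : Int) 0
      ∧ 1 ≤ PySem.List.pyGetD arr ((i : Int) + 1) 0
      ∧ 1 ≤ PySem.List.pyGetD arr ((i : Int) + 2) 0)
  ∨ (arr.length = 8 ∧ PySem.List.pyGetD arr 7 0 < 1)
  ∨ (arr.length = 9 ∧ ¬ (1 ≤ PySem.List.pyGetD arr 7 0 ∧ 1 ≤ PySem.List.pyGetD arr 8 0))
instance (arr : List Int) : Decidable (Pre_find_run arr) := by
  unfold Pre_find_run
  have : Decidable (∃ i : Nat, i < 8 ∧ i + 3 ≤ arr.length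
      ∧ 1 ≤ PySem.List.pyGetD arr (i : Int) 0
      ∧ 1 ≤ PySem.List.pyGetD arr ((i : Int) + 1) 0
      ∧ 1 ≤ PySem.List.pyGetD arr ((i : Int) + 2) 0) := decidable_of_iff
    (∃ i : Fin 8, ((i : Nat) + 3 ≤ arr.length
      ∧ 1 ≤ PySem.List.pyGetD arr ((i : Nat) : Int) 0
      ∧ 1 ≤ PySem.List.pyGetD arr (((i : Nat) : Int) + 1) 0
      ∧ 1 ≤ PySem.List.pyGetD arr (((i : Nat) : Int) + 2) 0))
    (by constructor
        · rintro ⟨i, h⟩; exact ⟨i, i.isLt, h⟩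
        · rintro ⟨i, hi, h⟩; exact ⟨⟨i, hi⟩, h⟩)
  infer_instance

def pvWitness_find_run : List Int := [1, 2, 3, 0, 0, 0, 0, 0, 0, 0]

def Spec_find_run (arr : List Int) (out : Bool) : Prop := out = find_run_alt arr
instance (arr : List Int) (out : Bool) : Decidable (Spec_find_run arr out) := by unfold Spec_find_run; infer_instance

-- ===== CLAIM (what is proved, stated in full; the proofs are below) =====
def Claim_equal_find_run : Prop := ∀ (arr : List Int), Dom_find_run arr → Pre_find_run arr → Spec_find_run arr (find_run arr)

-- ===== LEMMAS AND PROOFS =====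

-- Fuel-indexed Boolean abstractions of the two loops: both ports read arr only through the
-- ten tests `arr[k] >= 1` (k < 10), so each is an instance of a function of those Booleans.
def auxA (g : Nat → Bool) : Nat → Nat → Bool
  | 0, _ => false
  | fuel + 1, i =>
    if i < 8 then
      (if g i && g (i + 1) && g (i + 2) then true else auxA g fuel (i + 1))
    else false

def auxB (g : Nat → Bool) : Nat → Nat → Int → Bool
  | 0, _, _ => false
  | fuel + 1, j, c =>
    if j < 10 then
      if c + (10 - (j : Int)) < 3 then false
      else if g j then (if c + 1 = 3 then true else auxB g fuel (j + 1) (c + 1))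
      else auxB g fuel (j + 1) 0
    else false

def bitsOf (arr : List Int) : Nat → Bool :=
  fun k => decide (1 ≤ PySem.List.pyGetD arr (k : Int) 0)

theorem bitsOf_eq (arr : List Int) (k : Nat) :
    (bitsOf arr k = true) ↔ 1 ≤ PySem.List.pyGetD arr (k : Int) 0 := decide_eq_true_iff

theorem bridgeA (arr : List Int) : ∀ fuel i, 8 - i < fuel →
    findRunA arr i = auxA (bitsOf arr) fuel i := by
  intro fuel
  induction fuel with
  | zero => intro i h; omega
  | succ n ih =>
    intro i h
    rw [findRunA, auxA]
    by_cases hlt : i < 8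
    · simp only [hlt, if_true]
      have hcond : (PySem.List.pyGetD arr (i : Int) 0 ≥ 1
          ∧ PySem.List.pyGetD arr ((i : Int) + 1) 0 ≥ 1
          ∧ PySem.List.pyGetD arr ((i : Int) + 2) 0 ≥ 1)
          ↔ ((bitsOf arr i && bitsOf arr (i + 1) && bitsOf arr (i + 2)) = true) := by
        simp only [bitsOf, Bool.and_eq_true, decide_eq_true_iff, ge_iff_le]
        push_cast
        exact and_assoc.symm
      exact if_congr hcond rfl (ih (i + 1) (by omega))
    · simp [hlt]

theorem bridgeB (arr : List Int) : ∀ fuel j c, 10 - j < fuel →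
    findRunB arr j c = auxB (bitsOf arr) fuel j c := by
  intro fuel
  induction fuel with
  | zero => intro j c h; omega
  | succ n ih =>
    intro j c h
    rw [findRunB, auxB]
    by_cases hlt : j < 10
    · simp only [hlt, if_true]
      by_cases hc : c + (10 - (j : Int)) < 3
      · rw [if_pos hc, if_pos hc]
      · rw [if_neg hc, if_neg hc]
        have hcond : (PySem.List.pyGetD arr (j : Int) 0 ≥ 1) ↔ (bitsOf arr j = true) := by
          rw [bitsOf_eq]
        exact if_congr hcond
          (if_congr Iff.rfl rfl (ih (j + 1) (c + 1) (by omega)))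
          (ih (j + 1) 0 (by omega))
    · simp [hlt]

theorem auxA_ext (g g' : Nat → Bool) (hgg : ∀ k, k < 10 → g k = g' k) :
    ∀ fuel i, auxA g fuel i = auxA g' fuel i := by
  intro fuel
  induction fuel with
  | zero => intro i; rfl
  | succ n ih =>
    intro i
    rw [auxA, auxA]
    by_cases hlt : i < 8
    · rw [hgg i (by omega), hgg (i + 1) (by omega), hgg (i + 2) (by omega), ih (i + 1)]
    · simp [hlt]

theorem auxB_ext (g g' : Nat → Bool) (hgg : ∀ k, k < 10 → g k = g' k) :
    ∀ fuel j c, auxB g fuel j c = auxB g' fuel j c := by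
  intro fuel
  induction fuel with
  | zero => intro j c; rfl
  | succ n ih =>
    intro j c
    rw [auxB, auxB]
    by_cases hlt : j < 10
    · rw [hgg j (by omega), ih (j + 1) (c + 1), ih (j + 1) 0]
    · simp [hlt]

def extend (f : Fin 10 → Bool) : Nat → Bool :=
  fun k => if h : k < 10 then f ⟨k, h⟩ else false

set_option maxRecDepth 10000 in
theorem aux_key : ∀ f : Fin 10 → Bool, auxA (extend f) 9 0 = auxB (extend f) 11 0 0 := by
  decide

theorem ports_agree (arr : List Int) : find_run arr = find_run_alt arr := by
  have hx : ∀ k, k < 10 → bitsOf arr k = extend (fun m : Fin 10 => bitsOf arr m) k := by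
    intro k hk
    simp [extend, hk]
  calc find_run arr = auxA (bitsOf arr) 9 0 := bridgeA arr 9 0 (by omega)
    _ = auxA (extend (fun m : Fin 10 => bitsOf arr m)) 9 0 := auxA_ext _ _ hx 9 0
    _ = auxB (extend (fun m : Fin 10 => bitsOf arr m)) 11 0 0 := aux_key _
    _ = auxB (bitsOf arr) 11 0 0 := (auxB_ext _ _ hx 11 0 0).symm
    _ = find_run_alt arr := (bridgeB arr 11 0 0 (by omega)).symm

-- ===== VERDICT (by name: the statement is the Claim_ definition above) =====
theorem find_run_spec : Claim_equal_find_run := by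
  intro arr _ _
  unfold Spec_find_run
  exact ports_agree arr
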